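-- pv_equiv track=rewrite | github.com/Waffleer/Graph-Theory-Sequences | matrix.py | distribute_identical_objects
-- ===== SOURCE A (Python) =====
-- from itertools import combinations
-- from concurrent.futures import ThreadPoolExecutor, as_completed
--
-- OBJECT_WORKERS = 10
--
-- def per_combo_worker(combo_state):
--     combo, state = combo_state
--     state = list(state)  # convert tuple to mutable list temporarily
--     for i in combo:
--         if state[i] <= 0:
--             return None
--         state[i] -= 1
--     return tuple(state)  # return as tuple for immutability and efficiency
--
-- def distribute_identical_objects(num_objects, buckets):
--     n = len(buckets)
--     results = []
--
--     if num_objects > n: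
--         return []
--
--     buckets_tuple = tuple(buckets)  # immutable starting state
--
--     # Lazy generator of arguments
--     def args_generator():
--         for combo in combinations(range(n), num_objects):
--             yield (combo, buckets_tuple)
--
--     with ThreadPoolExecutor(max_workers=OBJECT_WORKERS) as executor:
--         for r in executor.map(per_combo_worker, args_generator()):
--             if r is not None:
--                 results.append(list(r))
--
--     return results
-- ===== SOURCE B (Python) =====
-- from itertools import combinations
--
-- def distribute_identical_objects(num_objects, buckets):
--     # Direct enumeration: combine only the indices whose bucket is positive,
--     # so no per-element guard is needed; same combinations order as A.
--     n = len(buckets)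
--     if num_objects > n:
--         return []
--     positive = [i for i in range(n) if buckets[i] > 0]
--     results = []
--     for combo in combinations(positive, num_objects):
--         state = list(buckets)
--         for i in combo:
--             state[i] -= 1
--         results.append(state)
--     return results
-- ===== Notes on version B (the rewrite author's own statement) =====
-- stated objective: simpler
-- what changed: B drops the ThreadPoolExecutor and the per-combination guarded decrement worker: it pre-filters the positive bucket indices once and enumerates combinations of only those, so every combination directly yields a decremented copy and the per-element <=0 check disappears.
import Mathlib
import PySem

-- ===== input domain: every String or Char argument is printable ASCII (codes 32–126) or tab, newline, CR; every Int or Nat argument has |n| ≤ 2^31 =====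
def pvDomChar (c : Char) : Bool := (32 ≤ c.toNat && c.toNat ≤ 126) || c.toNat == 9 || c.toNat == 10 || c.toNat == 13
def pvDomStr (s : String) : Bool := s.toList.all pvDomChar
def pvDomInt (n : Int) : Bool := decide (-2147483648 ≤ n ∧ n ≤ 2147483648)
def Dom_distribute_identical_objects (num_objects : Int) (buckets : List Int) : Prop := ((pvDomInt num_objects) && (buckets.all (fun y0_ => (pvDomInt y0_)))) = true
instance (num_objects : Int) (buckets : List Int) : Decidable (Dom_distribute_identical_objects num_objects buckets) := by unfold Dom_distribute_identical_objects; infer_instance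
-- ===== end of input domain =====

-- B replaces A's thread-pool + per-combination guarded worker by directly combining the
-- pre-filtered positive bucket indices (simpler decomposition; same output order).


-- itertools.combinations(xs, k) in lexicographic order of positions (shared helper:
-- both Pythons call itertools.combinations).
def pyCombos : List Int → Nat → List (List Int)
  | _, 0 => [[]]
  | [], _+1 => []
  | x :: rest, k+1 => (pyCombos rest k).map (x :: ·) ++ pyCombos rest (k+1)

-- ===== PORT A =====
-- per_combo_worker: sequentially guard-and-decrement; none = Python's `return None`.
def pvWorker (combo : List Int) (state : List Int) : Option (List Int) :=
  match combo with
  | [] => some state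
  | i :: rest =>
    match PySem.List.pyGet? state i with
    | none => none  -- unreachable for indices from range(len(state)); Python would raise IndexError
    | some v => if v ≤ 0 then none else pvWorker rest (PySem.List.pySetD state i (v - 1))

def distribute_identical_objects (num_objects : Int) (buckets : List Int) : List (List Int) :=
  let n := buckets.length
  if num_objects > (n : Int) then []
  else
    (pyCombos (PySem.List.pyRange 0 (n : Int) 1) num_objects.toNat).foldl
      (fun results combo =>
        match pvWorker combo buckets with
        | none => results
        | some r => results ++ [r]) []

-- ===== PORT B =====
-- state[i] -= 1 for each i in combo (indices always in range in Source B)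
def pvDecrement (buckets : List Int) (combo : List Int) : List Int :=
  combo.foldl (fun st i => PySem.List.pySetD st i (PySem.List.pyGetD st i 0 - 1)) buckets

def distribute_identical_objects_alt (num_objects : Int) (buckets : List Int) : List (List Int) :=
  if num_objects > (buckets.length : Int) then [] else
  let positive := (PySem.List.pyRange 0 (buckets.length : Int) 1).filter
      (fun i => decide (0 < PySem.List.pyGetD buckets i 0))
  (pyCombos positive num_objects.toNat).foldl
    (fun results combo => results ++ [pvDecrement buckets combo]) []

-- ===== PRECONDITION & SPEC =====
-- Pre_ excludes negative num_objects, on which both Pythons raise ValueError (itertools.combinations).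
def Pre_distribute_identical_objects (num_objects : Int) (buckets : List Int) : Prop :=
  0 ≤ num_objects
instance (num_objects : Int) (buckets : List Int) : Decidable (Pre_distribute_identical_objects num_objects buckets) := by unfold Pre_distribute_identical_objects; infer_instance
def pvWitness_distribute_identical_objects : Int × List Int := (1, [2, 0])

def Spec_distribute_identical_objects (num_objects : Int) (buckets : List Int) (out : List (List Int)) : Prop := out = distribute_identical_objects_alt num_objects buckets
instance (num_objects : Int) (buckets : List Int) (out : List (List Int)) : Decidable (Spec_distribute_identical_objects num_objects buckets out) := by unfold Spec_distribute_identical_objects; infer_instance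

-- ===== CLAIM (what is proved, stated in full; the proofs are below) =====
def Claim_equal_distribute_identical_objects : Prop := ∀ (num_objects : Int) (buckets : List Int), Dom_distribute_identical_objects num_objects buckets → Pre_distribute_identical_objects num_objects buckets → Spec_distribute_identical_objects num_objects buckets (distribute_identical_objects num_objects buckets)

-- ===== LEMMAS AND PROOFS =====

-- every produced combination is a sublist of the index list
theorem sublist_of_mem_pyCombos : ∀ (xs : List Int) (k : Nat) (c : List Int),
    c ∈ pyCombos xs k → c.Sublist xs := by
  intro xs
  induction xs with
  | nil => intro k c hc; cases k with
    | zero => simp [pyCombos] at hc; simp [hc]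
    | succ k => simp [pyCombos] at hc
  | cons x rest ih =>
    intro k c hc
    cases k with
    | zero => simp [pyCombos] at hc; simp [hc]
    | succ k =>
      simp only [pyCombos, List.mem_append, List.mem_map] at hc
      rcases hc with ⟨c', hc', rfl⟩ | hc
      · exact (ih k c' hc').cons₂ x
      · exact (ih (k+1) c hc).cons x

-- combinations of a filtered list = filtered combinations (same order)
theorem pyCombos_filter (p : Int → Bool) : ∀ (xs : List Int) (k : Nat),
    pyCombos (xs.filter p) k = (pyCombos xs k).filter (fun c => c.all p) := by
  intro xs
  induction xs with
  | nil => intro k; cases k with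
    | zero => simp [pyCombos]
    | succ k => simp [pyCombos]
  | cons x rest ih =>
    intro k
    cases k with
    | zero => simp [pyCombos]
    | succ k =>
      by_cases hx : p x
      · simp only [List.filter_cons, hx, if_true, pyCombos, List.filter_append, ih]
        congr 1
        rw [List.filter_map]
        congr 1
        apply List.filter_congr
        intro c _
        simp [Function.comp, hx]
      · have hnil : ((pyCombos rest k).map (x :: ·)).filter (fun c => c.all p) = [] := by
          rw [List.filter_eq_nil_iff]
          intro c hc
          simp only [List.mem_map] at hc
          rcases hc with ⟨c', _, rfl⟩
          simp [hx]
        rw [List.filter_cons_of_neg (by simp [hx]), ih (k+1)]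
        simp only [pyCombos, List.filter_append, hnil, List.nil_append]

-- A's accumulating-match loop is a filterMap
theorem foldl_match_filterMap (f : List Int → Option (List Int)) :
    ∀ (l : List (List Int)) (a : List (List Int)),
    l.foldl (fun results combo => match f combo with
      | none => results
      | some r => results ++ [r]) a = a ++ l.filterMap f := by
  intro l
  induction l with
  | nil => simp
  | cons c l ih =>
    intro a
    simp only [List.foldl_cons, List.filterMap_cons]
    cases hf : f c with
    | none => simp [hf, ih]
    | some r => simp [hf, ih]

-- Bool.all congruence over members (used by pvWorker_char)
theorem all_congr_mem (l : List Int) (p q : Int → Bool) (h : ∀ x ∈ l, p x = q x) :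
    l.all p = l.all q := by
  induction l with
  | nil => rfl
  | cons x xs ih =>
    simp only [List.all_cons, h x (by simp), ih (fun y hy => h y (by simp [hy]))]

-- worker characterization: on a duplicate-free, in-range combo the guarded sequential
-- decrement succeeds iff all touched buckets are positive, and then equals pvDecrement
theorem pvWorker_char : ∀ (combo state : List Int), combo.Nodup →
    (∀ i ∈ combo, 0 ≤ i ∧ i < (state.length : Int)) →
    pvWorker combo state =
      if combo.all (fun i => decide (0 < PySem.List.pyGetD state i 0))
      then some (pvDecrement state combo) else none := by
  intro combo
  induction combo with
  | nil => intro state _ _; simp [pvWorker, pvDecrement]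
  | cons i rest ih =>
    intro state hnd hrange
    obtain ⟨hi0, hilen⟩ := hrange i (by simp)
    have hget : PySem.List.pyGet? state i = some state[i.toNat] :=
      PySem.List.pyGet?_eq_some_getElem state hi0 hilen
    have hgetD : PySem.List.pyGetD state i 0 = state[i.toNat] :=
      PySem.List.pyGetD_eq_getElem state 0 hi0 hilen
    simp only [pvWorker, hget]
    by_cases hv : state[i.toNat] ≤ 0
    · simp only [hv, if_true]
      have : ¬ (0 < PySem.List.pyGetD state i 0) := by rw [hgetD]; omega
      simp [List.all_cons, this]
    · simp only [hv, if_false]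
      rw [PySem.List.pySetD_of_nonneg _ _ hi0]
      have hrest_range : ∀ j ∈ rest, 0 ≤ j ∧
          j < (((state.set i.toNat (state[i.toNat] - 1)).length : Nat) : Int) := by
        intro j hj
        obtain ⟨h1, h2⟩ := hrange j (by simp [hj])
        exact ⟨h1, by simpa using h2⟩
      have hrest_getD : ∀ j ∈ rest,
          PySem.List.pyGetD (state.set i.toNat (state[i.toNat] - 1)) j 0 =
            PySem.List.pyGetD state j 0 := by
        intro j hj
        obtain ⟨hj0, hjlen⟩ := hrange j (by simp [hj])
        have hne : j ≠ i := fun h => (List.nodup_cons.mp hnd).1 (h ▸ hj)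
        rw [PySem.List.pyGetD_eq_getElem _ 0 hj0 (by simpa using hjlen),
            PySem.List.pyGetD_eq_getElem state 0 hj0 hjlen]
        rw [List.getElem_set_ne]
        omega
      rw [ih _ (List.nodup_cons.mp hnd).2 hrest_range]
      have hall : rest.all
            (fun j => decide (0 < PySem.List.pyGetD (state.set i.toNat (state[i.toNat] - 1)) j 0)) =
          rest.all (fun j => decide (0 < PySem.List.pyGetD state j 0)) :=
        all_congr_mem rest _ _ (fun j hj => by rw [hrest_getD j hj])
      have hdec : pvDecrement state (i :: rest) =
          pvDecrement (state.set i.toNat (state[i.toNat] - 1)) rest := by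
        simp only [pvDecrement, List.foldl_cons, hgetD, PySem.List.pySetD_of_nonneg _ _ hi0]
      have hcond : ((i :: rest).all (fun j => decide (0 < PySem.List.pyGetD state j 0))) =
          rest.all (fun j => decide (0 < PySem.List.pyGetD state j 0)) := by
        simp [List.all_cons, hgetD]
        omega
      rw [hall, hcond, hdec]

-- B's appending foldl is a map
theorem foldl_append_map (g : List Int → List Int) :
    ∀ (l : List (List Int)) (a : List (List Int)),
      l.foldl (fun results combo => results ++ [g combo]) a = a ++ l.map g := by
  intro l
  induction l with
  | nil => simp
  | cons c l ih => intro a; simp [ih]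

-- filterMap of a guarded some is map-after-filter
theorem filterMap_guard (p : List Int → Bool) (g : List Int → List Int) :
    ∀ (l : List (List Int)),
      l.filterMap (fun c => if p c then some (g c) else none) = (l.filter p).map g := by
  intro l
  induction l with
  | nil => rfl
  | cons c l ih =>
    by_cases hc : p c
    · simp [List.filter_cons, hc, ih]
    · simp [List.filter_cons, hc, ih]

-- ===== VERDICT (by name: the statement is the Claim_ definition above) =====
theorem distribute_identical_objects_spec : Claim_equal_distribute_identical_objects := by
  intro num_objects buckets _ hpre
  unfold Spec_distribute_identical_objects distribute_identical_objects distribute_identical_objects_alt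
  have hpre' : 0 ≤ num_objects := hpre
  set n := buckets.length with hn
  set rng := PySem.List.pyRange 0 (n : Int) 1 with hrng
  have hrnglen : rng.length = n := by
    rw [hrng, PySem.List.length_pyRange_one]; omega
  set p : Int → Bool := fun i => decide (0 < PySem.List.pyGetD buckets i 0) with hp
  by_cases hbig : num_objects > (n : Int)
  · simp only [hbig, if_true]
  · simp only [hbig, if_false]
    rw [foldl_match_filterMap, foldl_append_map, pyCombos_filter p rng num_objects.toNat]
    simp only [List.nil_append]
    rw [← filterMap_guard (fun c => c.all p) (pvDecrement buckets)]
    apply List.filterMap_congr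
    intro c hc
    have hsub := sublist_of_mem_pyCombos rng num_objects.toNat c hc
    have hnd : c.Nodup := hsub.nodup (by rw [hrng]; exact PySem.List.nodup_pyRange_one 0 (n:Int))
    have hrangec : ∀ i ∈ c, 0 ≤ i ∧ i < (buckets.length : Int) := by
      intro i hi
      have : i ∈ rng := hsub.mem hi
      rw [hrng, PySem.List.mem_pyRange_one] at this
      exact ⟨this.1, by rw [← hn]; exact this.2⟩
    exact pvWorker_char c buckets hnd hrangec
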